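-- pv_equiv track=rewrite | github.com/DaltonCole/ProgramingProblems | kattis/deduplicatingfiles/xor.py | find_u_c
-- ===== SOURCE A (Python) =====
-- def find_u_c(hash_dict):
-- 	unique = 0
-- 	collisions = 0
-- 	for _, value in hash_dict.items():
-- 		unique += len(set(value))
-- 		for i in range(len(value)):
-- 			for j in range(i+1, len(value)):
-- 				if value[i] != value[j]:
-- 					collisions += 1
-- 	return unique, collisions
-- ===== SOURCE B (Python) =====
-- def find_u_c(hash_dict):
--     unique = 0
--     collisions = 0
--     for value in hash_dict.values():
--         counts = {}
--         for v in value: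
--             counts[v] = counts.get(v, 0) + 1
--         n = len(value)
--         unique += len(counts)
--         collisions += n * (n - 1) // 2
--         for c in counts.values():
--             collisions -= c * (c - 1) // 2
--     return unique, collisions
-- ===== Notes on version B (the rewrite author's own statement) =====
-- stated objective: alternative
-- what changed: Replaces A's O(n^2) nested index loops per list with a single counting pass: collisions = C(n,2) minus the sum of C(cnt,2) over the value counts, and unique = number of distinct keys of the same count dict.
import Mathlib
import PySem

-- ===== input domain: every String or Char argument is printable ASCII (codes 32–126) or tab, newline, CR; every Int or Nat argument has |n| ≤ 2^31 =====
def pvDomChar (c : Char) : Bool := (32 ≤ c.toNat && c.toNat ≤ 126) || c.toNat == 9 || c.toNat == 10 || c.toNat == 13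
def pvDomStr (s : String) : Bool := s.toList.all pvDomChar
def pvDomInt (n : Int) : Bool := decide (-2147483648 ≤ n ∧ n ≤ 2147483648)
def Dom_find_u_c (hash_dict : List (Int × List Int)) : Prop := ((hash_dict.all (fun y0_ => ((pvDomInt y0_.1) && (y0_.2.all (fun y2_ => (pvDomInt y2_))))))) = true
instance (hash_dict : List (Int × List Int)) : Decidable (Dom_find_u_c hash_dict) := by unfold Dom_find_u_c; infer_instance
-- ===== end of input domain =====

-- B replaces A's nested index loops per list by one counting pass per list
-- (collisions = C(n,2) - sum of C(cnt,2) over the value counts); objective: alternative algorithm.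

-- ===== PORT A =====
def find_u_c (hash_dict : List (Int × List Int)) : Int × Int :=
  hash_dict.foldl (fun acc kv =>
    let value := kv.2
    let unique := acc.1 + ((PySem.Set.ofList value).length : Int)
    let collisions := (PySem.List.pyRange 0 (value.length : Int) 1).foldl (fun c i =>
      (PySem.List.pyRange (i + 1) (value.length : Int) 1).foldl (fun c j =>
        if PySem.List.pyGetD value i 0 ≠ PySem.List.pyGetD value j 0 then c + 1 else c) c) acc.2
    (unique, collisions)) (0, 0)

-- ===== PORT B =====
def find_u_c_alt (hash_dict : List (Int × List Int)) : Int × Int :=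
  hash_dict.foldl (fun acc kv =>
    let value := kv.2
    let counts := value.foldl (fun (d : PySem.Dict Int Int) v => d.insert v (d.getD v 0 + 1)) PySem.Dict.empty
    let n : Int := (value.length : Int)
    let unique := acc.1 + (counts.size : Int)
    let collisions := acc.2 + PySem.Int.floordiv (n * (n - 1)) 2
    let collisions := counts.values.foldl (fun c cnt => c - PySem.Int.floordiv (cnt * (cnt - 1)) 2) collisions
    (unique, collisions)) (0, 0)

-- ===== PRECONDITION & SPEC =====
def Spec_find_u_c (hash_dict : List (Int × List Int)) (out : Int × Int) : Prop := out = find_u_c_alt hash_dict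
instance (hash_dict : List (Int × List Int)) (out : Int × Int) : Decidable (Spec_find_u_c hash_dict out) := by unfold Spec_find_u_c; infer_instance

-- ===== CLAIM (what is proved, stated in full; the proofs are below) =====
def Claim_equal_find_u_c : Prop := ∀ (hash_dict : List (Int × List Int)), Dom_find_u_c hash_dict → Spec_find_u_c hash_dict (find_u_c hash_dict)

-- ===== LEMMAS AND PROOFS =====

-- number of unordered index pairs i < j with distinct entries, structurally
def nePairs : List Int → Nat
  | [] => 0
  | x :: xs => xs.countP (fun y => decide (x ≠ y)) + nePairs xs

theorem foldl_sub (l : List Int) (g : Int → Int) (a : Int) :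
    l.foldl (fun c x => c - g x) a = a - (l.map g).sum := by
  induction l generalizing a with
  | nil => simp
  | cons x xs ih => simp [ih, List.sum_cons]; ring

theorem sum_map_natCast (l : List Int) (f : Int → Nat) :
    (l.map (fun x => ((f x : Nat) : Int))).sum = ((l.map f).sum : Int) := by
  induction l with
  | nil => simp
  | cons x xs ih => simp [ih]

theorem choose_two_cast (m : Nat) :
    PySem.Int.floordiv ((m : Int) * ((m : Int) - 1)) 2 = (m.choose 2 : Int) := by
  cases m with
  | zero => decide
  | succ k =>
    have h1 : ((k+1 : Nat) : Int) * (((k+1 : Nat) : Int) - 1) = (((k+1) * k : Nat) : Int) := by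
      push_cast; ring
    rw [h1]
    have h2 : PySem.Int.floordiv ((((k+1) * k : Nat)) : Int) ((2 : Nat) : Int) = (((k+1) * k / 2 : Nat) : Int) :=
      PySem.Int.floordiv_natCast _ _
    have h3 : (k+1).choose 2 = (k+1) * k / 2 := by
      rw [Nat.choose_two_right]; simp
    rw [h3]
    exact_mod_cast h2

theorem choose_two_cast_div (m : Nat) :
    ((m : Int) * ((m : Int) - 1)) / 2 = (m.choose 2 : Int) := by
  rw [← PySem.Int.floordiv_eq_ediv_of_pos (by norm_num)]
  exact choose_two_cast m

theorem countP_ne_add_count (x : Int) (xs : List Int) :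
    xs.countP (fun y => decide (x ≠ y)) + xs.count x = xs.length := by
  induction xs with
  | nil => simp
  | cons y ys ih =>
    rw [List.countP_cons, List.count_cons, List.length_cons]
    by_cases h : x = y
    · have hp : (decide (x ≠ y) : Bool) = false := by simp [h]
      have hq : (y == x) = true := by simp [h]
      rw [hp, hq]
      simp only [Bool.false_eq_true, if_true, if_false]
      omega
    · have hp : (decide (x ≠ y) : Bool) = true := by simp [h]
      have hq : (y == x) = false := by simp [Ne.symm h]
      rw [hp, hq]
      simp only [Bool.false_eq_true, if_true, if_false]
      omega

theorem choose_two_succ (n : Nat) : (n + 1).choose 2 = n.choose 2 + n := by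
  have h := Nat.choose_succ_succ n 1
  simp [Nat.choose_one_right] at h
  omega

-- A's row count over the tail: the inner range loop counts entries ≠ value[i]
theorem sum_rows (l : List Int) :
    ((List.range l.length).map (fun k =>
      (((l.drop (k+1)).countP (fun y => decide (l.getD k 0 ≠ y)) : Nat) : Int))).sum
      = (nePairs l : Int) := by
  induction l with
  | nil => simp [nePairs]
  | cons x xs ih =>
    rw [List.length_cons, List.range_succ_eq_map]
    simp only [List.map_cons, List.map_map, List.sum_cons]
    have hmap : (List.range xs.length).map
        ((fun k => (((( x :: xs).drop (k+1)).countP (fun y => decide ((x :: xs).getD k 0 ≠ y)) : Nat) : Int)) ∘ Nat.succ)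
        = (List.range xs.length).map (fun k =>
          (((xs.drop (k+1)).countP (fun y => decide (xs.getD k 0 ≠ y)) : Nat) : Int)) := by
      apply List.map_congr_left
      intro k _
      simp [Function.comp, Nat.succ_eq_add_one]
    rw [hmap, ih]
    simp [nePairs]

-- the combinatorial identity:  nePairs l + Σ_{k ∈ toFinset} C(count k, 2) = C(|l|, 2)
theorem nePairs_choose (l : List Int) :
    nePairs l + ∑ k ∈ l.toFinset, (l.count k).choose 2 = l.length.choose 2 := by
  induction l with
  | nil => simp [nePairs]
  | cons x xs ih =>
    have hsplit := countP_ne_add_count x xs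
    have hchoose := choose_two_succ xs.length
    by_cases hx : x ∈ xs
    · have hmem : x ∈ xs.toFinset := List.mem_toFinset.mpr hx
      have hins : (x :: xs).toFinset = xs.toFinset := by
        simp [List.toFinset_cons, Finset.insert_eq_self.mpr hmem]
      rw [hins]
      have hsum : ∑ k ∈ xs.toFinset, ((x :: xs).count k).choose 2
          = ((x :: xs).count x).choose 2 + ∑ k ∈ xs.toFinset.erase x, ((x :: xs).count k).choose 2 :=
        (Finset.add_sum_erase _ _ hmem).symm
      have hsum2 : ∑ k ∈ xs.toFinset.erase x, ((x :: xs).count k).choose 2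
          = ∑ k ∈ xs.toFinset.erase x, (xs.count k).choose 2 := by
        apply Finset.sum_congr rfl
        intro k hk
        have hkx : k ≠ x := (Finset.mem_erase.mp hk).1
        rw [List.count_cons_of_ne hkx.symm]
      have hsumx : ∑ k ∈ xs.toFinset, (xs.count k).choose 2
          = (xs.count x).choose 2 + ∑ k ∈ xs.toFinset.erase x, (xs.count k).choose 2 :=
        (Finset.add_sum_erase _ _ hmem).symm
      have hcx : (x :: xs).count x = xs.count x + 1 := List.count_cons_self
      have hcc := choose_two_succ (xs.count x)
      simp only [nePairs, List.length_cons, hchoose, hsum, hsum2, hcx, hcc]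
      omega
    · have hmem : x ∉ xs.toFinset := fun h => hx (List.mem_toFinset.mp h)
      have hcnt0 : xs.count x = 0 := List.count_eq_zero.mpr hx
      rw [List.toFinset_cons, Finset.sum_insert hmem]
      have hsum2 : ∑ k ∈ xs.toFinset, ((x :: xs).count k).choose 2
          = ∑ k ∈ xs.toFinset, (xs.count k).choose 2 := by
        apply Finset.sum_congr rfl
        intro k hk
        have hkx : x ≠ k := by rintro rfl; exact hmem hk
        rw [List.count_cons_of_ne hkx]
      have hcx : (x :: xs).count x = 1 := by rw [List.count_cons_self, hcnt0]
      have h10 : (1 : Nat).choose 2 = 0 := rfl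
      simp only [nePairs, List.length_cons, hchoose, hsum2, hcx, h10]
      omega

-- sums over the distinct-elements list equal Finset sums
theorem sum_ofList_eq_finset (l : List Int) (f : Int → Nat) :
    ((PySem.Set.ofList l).map f).sum = ∑ k ∈ l.toFinset, f k := by
  have hnd : (PySem.Set.ofList l).Nodup := PySem.Set.nodup_ofList l
  have hfs : (PySem.Set.ofList l).toFinset = l.toFinset := by
    apply Finset.ext
    intro a
    simp [List.mem_toFinset, PySem.Set.mem_ofList]
  rw [← hfs, List.sum_toFinset _ hnd]

-- A's double loop per list, reduced
theorem loopA (v : List Int) (a : Int) :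
    (PySem.List.pyRange 0 (v.length : Int) 1).foldl (fun c i =>
      (PySem.List.pyRange (i + 1) (v.length : Int) 1).foldl (fun c j =>
        if PySem.List.pyGetD v i 0 ≠ PySem.List.pyGetD v j 0 then c + 1 else c) c) a
    = a + (nePairs v : Int) := by
  have hcongr : ∀ (c i : Int), i ∈ PySem.List.pyRange 0 (v.length : Int) 1 →
      (PySem.List.pyRange (i + 1) (v.length : Int) 1).foldl (fun c j =>
        if PySem.List.pyGetD v i 0 ≠ PySem.List.pyGetD v j 0 then c + 1 else c) c
      = c + (((v.drop (i+1).toNat).countP (fun y => decide (PySem.List.pyGetD v i 0 ≠ y)) : Nat) : Int) := by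
    intro c i hi
    have hi0 : (0:Int) ≤ i := (PySem.List.mem_pyRange_one.mp hi).1
    rw [PySem.List.foldl_ite_add_one]
    congr 1
    have hmap := PySem.List.map_pyGetD_pyRange' (xs := v) (a := i+1) (d := 0) (by omega)
    rw [← hmap, List.countP_map]
    rfl
  have h1 := PySem.List.foldl_congr_mem
      (l := PySem.List.pyRange 0 (v.length : Int) 1)
      (f := fun c i => (PySem.List.pyRange (i + 1) (v.length : Int) 1).foldl (fun c j =>
        if PySem.List.pyGetD v i 0 ≠ PySem.List.pyGetD v j 0 then c + 1 else c) c)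
      (g := fun c i => c + (((v.drop (i+1).toNat).countP (fun y => decide (PySem.List.pyGetD v i 0 ≠ y)) : Nat) : Int))
      (init := a) (fun c i hi => hcongr c i hi)
  rw [h1, PySem.List.foldl_add]
  congr 1
  rw [PySem.List.pyRange_zero_natCast, List.map_map]
  have hmap2 : (List.range v.length).map
      ((fun i => (((v.drop (i+1).toNat).countP (fun y => decide (PySem.List.pyGetD v i 0 ≠ y)) : Nat) : Int)) ∘ (Nat.cast : Nat → Int))
      = (List.range v.length).map (fun k =>
        (((v.drop (k+1)).countP (fun y => decide (v.getD k 0 ≠ y)) : Nat) : Int)) := by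
    apply List.map_congr_left
    intro k _
    have h1 : ((k : Int) + 1).toNat = k + 1 := by omega
    simp [Function.comp, h1, PySem.List.pyGetD_natCast]
  rw [hmap2, sum_rows]

-- B's per-list contribution, reduced
theorem loopB (v : List Int) (a : Int) :
    ((v.foldl (fun (d : PySem.Dict Int Int) x => d.insert x (d.getD x 0 + 1)) PySem.Dict.empty).values.foldl
      (fun c cnt => c - PySem.Int.floordiv (cnt * (cnt - 1)) 2)
      (a + PySem.Int.floordiv ((v.length : Int) * ((v.length : Int) - 1)) 2))
    = a + (v.length.choose 2 : Int) - ((∑ k ∈ v.toFinset, (v.count k).choose 2 : Nat) : Int) := by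
  rw [PySem.Dict.foldl_insert_getD_add_one_eq_counter, choose_two_cast, foldl_sub]
  congr 1
  have hvals : (PySem.Dict.counter v).values = (PySem.Set.ofList v).map (fun k => ((v.count k : Nat) : Int)) := by
    show (PySem.Dict.counter v).items.map (·.2) = _
    rw [PySem.Dict.items_counter, List.map_map]
    rfl
  rw [hvals, List.map_map]
  have hmap : ((PySem.Set.ofList v).map
      ((fun cnt => PySem.Int.floordiv (cnt * (cnt - 1)) 2) ∘ (fun k => ((v.count k : Nat) : Int))))
      = (PySem.Set.ofList v).map (fun k => (((v.count k).choose 2 : Nat) : Int)) := by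
    apply List.map_congr_left
    intro k _
    simp [Function.comp, choose_two_cast_div]
  rw [hmap, sum_map_natCast, sum_ofList_eq_finset]

theorem sizeB (v : List Int) :
    ((v.foldl (fun (d : PySem.Dict Int Int) x => d.insert x (d.getD x 0 + 1)) PySem.Dict.empty).size : Int)
      = ((PySem.Set.ofList v).length : Int) := by
  rw [PySem.Dict.foldl_insert_getD_add_one_eq_counter]
  have h : (PySem.Dict.counter v).size = (PySem.Dict.counter v).keys.length := by
    show (PySem.Dict.counter v).items.length = ((PySem.Dict.counter v).items.map (·.1)).length
    rw [List.length_map]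
  rw [h, PySem.Dict.keys_counter]

-- ===== VERDICT (by name: the statement is the Claim_ definition above) =====
theorem find_u_c_spec : Claim_equal_find_u_c := by
  intro hd _
  unfold Spec_find_u_c find_u_c find_u_c_alt
  have hf : (fun (acc : Int × Int) (kv : Int × List Int) =>
      let value := kv.2
      let unique := acc.1 + ((PySem.Set.ofList value).length : Int)
      let collisions := (PySem.List.pyRange 0 (value.length : Int) 1).foldl (fun c i =>
        (PySem.List.pyRange (i + 1) (value.length : Int) 1).foldl (fun c j =>
          if PySem.List.pyGetD value i 0 ≠ PySem.List.pyGetD value j 0 then c + 1 else c) c) acc.2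
      (unique, collisions))
      = (fun (acc : Int × Int) (kv : Int × List Int) =>
      let value := kv.2
      let counts := value.foldl (fun (d : PySem.Dict Int Int) v => d.insert v (d.getD v 0 + 1)) PySem.Dict.empty
      let n : Int := (value.length : Int)
      let unique := acc.1 + (counts.size : Int)
      let collisions := acc.2 + PySem.Int.floordiv (n * (n - 1)) 2
      let collisions := counts.values.foldl (fun c cnt => c - PySem.Int.floordiv (cnt * (cnt - 1)) 2) collisions
      (unique, collisions)) := by
    funext acc kv
    simp only
    rw [loopA, loopB, sizeB]
    have hid := nePairs_choose kv.2
    simp only [Prod.mk.injEq]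
    constructor <;> first | trivial | omega
  rw [hf]
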